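-- pv_equiv track=rewrite | github.com/garden-kim-git/CodingTest | 프로그래머스/0/181893. 배열 조각하기/배열 조각하기.py | solution
-- ===== SOURCE A (Python) =====
-- def solution(arr, query):
--     answer = []
--     for i in range(len(query)) :
--         idx = query[i]
--         if i % 2 == 0 :
--             arr = arr[:idx+1]
--         else :
--             arr = arr[idx:]
--     answer = arr
--     return answer
-- ===== SOURCE B (Python) =====
-- def solution(arr, query):
--     # Track the absolute window [lo, lo+n) into arr instead of re-slicing each time.
--     lo, n = 0, len(arr)
--     for i, idx in enumerate(query):
--         if i % 2 == 0:
--             stop = idx + 1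
--             n = max(stop + n, 0) if stop < 0 else min(stop, n)
--         else:
--             start = max(idx + n, 0) if idx < 0 else min(idx, n)
--             lo += start
--             n -= start
--     return arr[lo:lo + n]
-- ===== Notes on version B (the rewrite author's own statement) =====
-- stated objective: alternative
-- what changed: Instead of materializing a new list slice for every query, B tracks the absolute window bounds (lo, n) with Python's slice-clamping arithmetic and takes a single final slice.
import Mathlib
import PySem

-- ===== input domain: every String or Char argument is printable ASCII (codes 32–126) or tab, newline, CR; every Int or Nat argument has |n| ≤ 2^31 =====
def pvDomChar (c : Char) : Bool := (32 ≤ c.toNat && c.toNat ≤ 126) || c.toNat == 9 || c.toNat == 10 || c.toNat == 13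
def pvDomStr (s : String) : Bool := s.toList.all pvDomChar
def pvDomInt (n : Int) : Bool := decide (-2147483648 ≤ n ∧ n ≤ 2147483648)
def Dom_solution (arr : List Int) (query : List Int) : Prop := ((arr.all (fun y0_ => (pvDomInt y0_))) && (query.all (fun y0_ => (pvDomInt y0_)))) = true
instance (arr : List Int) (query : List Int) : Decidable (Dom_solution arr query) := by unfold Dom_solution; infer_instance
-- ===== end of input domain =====

-- B replaces A's repeated materialized list slicing by tracking absolute window
-- bounds lo/n with Python's clamping rule and taking one final slice.

-- ===== PORT A =====
-- loop body: on even i trim to arr[:idx+1], on odd i to arr[idx:]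
def stepA (cur : List Int) (p : Int × Int) : List Int :=
  if PySem.Int.mod p.1 2 = 0 then PySem.List.slice cur none (some (p.2 + 1))
  else PySem.List.slice cur (some p.2) none

def solution (arr : List Int) (query : List Int) : List Int :=
  (PySem.List.enumerate query 0).foldl stepA arr

-- ===== PORT B =====
-- loop body of Source B: update (lo, n) with Python's slice-clamping arithmetic
def stepB (st : Int × Int) (p : Int × Int) : Int × Int :=
  if PySem.Int.mod p.1 2 = 0 then
    let stop := p.2 + 1
    (st.1, if stop < 0 then max (stop + st.2) 0 else min stop st.2)
  else
    let start := if p.2 < 0 then max (p.2 + st.2) 0 else min p.2 st.2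
    (st.1 + start, st.2 - start)

def solution_alt (arr : List Int) (query : List Int) : List Int :=
  let st := (PySem.List.enumerate query 0).foldl stepB (0, PySem.List.len arr)
  PySem.List.slice arr (some st.1) (some (st.1 + st.2))

-- ===== PRECONDITION & SPEC =====
def Spec_solution (arr : List Int) (query : List Int) (out : List Int) : Prop := out = solution_alt arr query
instance (arr : List Int) (query : List Int) (out : List Int) : Decidable (Spec_solution arr query out) := by unfold Spec_solution; infer_instance

-- ===== CLAIM (what is proved, stated in full; the proofs are below) =====
def Claim_equal_solution : Prop := ∀ (arr : List Int) (query : List Int), Dom_solution arr query → Spec_solution arr query (solution arr query)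

-- ===== LEMMAS AND PROOFS =====

-- B's Int clamping arithmetic is exactly PySem's clampIdx
lemma clamp_eq (n : Nat) (i : Int) :
    (if i < 0 then max (i + n) 0 else min i n) = ((PySem.List.clampIdx n i : Nat) : Int) := by
  unfold PySem.List.clampIdx
  split_ifs <;> push_cast <;> omega

lemma clamp_le (n : Nat) (i : Int) : PySem.List.clampIdx n i ≤ n := by
  unfold PySem.List.clampIdx
  split_ifs <;> omega

lemma slice_none_some (xs : List Int) (b : Int) :
    PySem.List.slice xs none (some b) = xs.take (PySem.List.clampIdx xs.length b) := by
  simp [PySem.List.slice]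

lemma loop_eq (xs : List Int) : ∀ (q : List Int) (i0 : Int) (lo n : Nat), lo + n ≤ xs.length →
    ∃ lo' n' : Nat, lo' + n' ≤ xs.length ∧
      List.foldl stepB ((lo : Int), (n : Int)) (PySem.List.enumerate q i0) = ((lo' : Int), (n' : Int)) ∧
      List.foldl stepA ((xs.drop lo).take n) (PySem.List.enumerate q i0) = (xs.drop lo').take n' := by
  intro q
  induction q with
  | nil =>
    intro i0 lo n h
    exact ⟨lo, n, h, by simp [PySem.List.enumerate], by simp [PySem.List.enumerate]⟩
  | cons idx q ih =>
    intro i0 lo n h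
    rw [PySem.List.enumerate_cons, List.foldl_cons, List.foldl_cons]
    have hlen : ((xs.drop lo).take n).length = n := by
      simp [List.length_take, List.length_drop]; omega
    by_cases hp : PySem.Int.mod i0 2 = 0
    · -- even step: trim the right end
      set k := PySem.List.clampIdx n (idx + 1) with hk
      have hkn : k ≤ n := clamp_le n (idx + 1)
      have hB : stepB ((lo : Int), (n : Int)) (i0, idx) = ((lo : Int), (k : Int)) := by
        simp only [stepB, hp, if_pos]
        exact congrArg _ (clamp_eq n (idx + 1))
      have hA : stepA ((xs.drop lo).take n) (i0, idx) = (xs.drop lo).take k := by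
        simp only [stepA, hp, if_pos, slice_none_some, hlen, List.take_take, hk]
        congr 1
        omega
      rw [hB, hA]
      exact ih (i0 + 1) lo k (by omega)
    · -- odd step: trim the left end
      set s := PySem.List.clampIdx n idx with hs
      have hsn : s ≤ n := clamp_le n idx
      have hB : stepB ((lo : Int), (n : Int)) (i0, idx) = (((lo + s : Nat) : Int), ((n - s : Nat) : Int)) := by
        simp only [stepB, hp, if_neg, not_false_iff]
        rw [clamp_eq n idx, ← hs]
        simp only [Prod.mk.injEq]
        constructor <;> push_cast <;> omega
      have hA : stepA ((xs.drop lo).take n) (i0, idx) = (xs.drop (lo + s)).take (n - s) := by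
        simp only [stepA, hp, if_neg, not_false_iff, PySem.List.slice_some_none, hlen, ← hs,
          List.drop_take, List.drop_drop]
      rw [hB, hA]
      exact ih (i0 + 1) (lo + s) (n - s) (by omega)

-- ===== VERDICT (by name: the statement is the Claim_ definition above) =====
theorem solution_spec : Claim_equal_solution := by
  intro arr query _
  unfold Spec_solution solution solution_alt
  obtain ⟨lo', n', _, hB, hA⟩ := loop_eq arr query 0 0 arr.length (by omega)
  simp only [List.drop_zero, List.take_length] at hA
  rw [hA]
  simp only [PySem.List.len]
  rw [show ((0 : Int), (arr.length : Int)) = (((0 : Nat) : Int), (arr.length : Int)) by norm_num,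
    hB]
  rw [show ((lo' : Int) + (n' : Int)) = (((lo' : Int)) + ((n' : Int))) from rfl,
    PySem.List.slice_natCast_add]
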